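-- pv_equiv track=rewrite | github.com/fl028/catcoder-codingcontest | rock_paper_scissors/Level3/main.py | distribute_fighters
-- ===== SOURCE A (Python) =====
-- def getNextIndex(tournament, type):
--     return tournament.index(type)
--
-- def getMagicSequence3R1P(tournament):
--     result = ""
--     Index_R = getNextIndex(tournament, "R")
--     result += tournament.pop(Index_R)
--
--     Index_R = getNextIndex(tournament, "R")
--     result += tournament.pop(Index_R)
--
--     Index_R = getNextIndex(tournament, "R")
--     result += tournament.pop(Index_R)
--
--     Index_P = getNextIndex(tournament, "P")
--     result += tournament.pop(Index_P)
--
--     return result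
--
-- def getMagicSequenceRP(tournament):
--     result = ""
--     Index_R = getNextIndex(tournament, "R")
--     result += tournament.pop(Index_R)
--
--     Index_P = getNextIndex(tournament, "P")
--     result += tournament.pop(Index_P)
--
--     return result
--
-- def getMagicSequenceRX(tournament):
--     result = ""
--     Index_R = getNextIndex(tournament, "R")
--     result += tournament.pop(Index_R)
--
--     #wenn p -> dann p
--     try:
--         Index_P = getNextIndex(tournament, "P")
--         result += tournament.pop(Index_P)
--     #wenn s -> dann s
--     except:
--         Index_S = getNextIndex(tournament, "S")
--         result += tournament.pop(Index_S)
--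
--     return result
--
-- def distribute_fighters(tournament):
--     distribution = ""
--
--     while tournament.count("R") >= 3 and tournament.count("P") >= 1:
--         distribution += getMagicSequence3R1P(tournament)
--     #2r -> RR PP
--     if tournament.count("R") >= 2:
--         #RP RS
--         distribution += getMagicSequenceRP(tournament)
--
--     #1r -> RP
--     if tournament.count("R") >= 1:
--         distribution += getMagicSequenceRX(tournament)
--
--     distribution += "".join(tournament)
--
--     return distribution
-- ===== SOURCE B (Python) =====
-- def distribute_fighters(tournament):
--     # Count fighters once, emit the deterministic prefix arithmetically,
--     # then collect the leftover fighters in a single pass.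
--     # Note: unlike the original, this does not mutate `tournament` (return value is the same).
--     r = tournament.count("R")
--     p = tournament.count("P")
--     k = min(r // 3, p)
--     prefix = "RRRP" * k
--     nR, nP, nS = 3 * k, k, 0
--     r1, p1 = r - 3 * k, p - k
--     if r1 >= 2:
--         prefix += "RP"
--         nR += 1
--         nP += 1
--         r1 -= 1
--         p1 -= 1
--     if r1 >= 1:
--         nR += 1
--         if p1 >= 1:
--             prefix += "RP"
--             nP += 1
--         else:
--             prefix += "RS"
--             nS += 1
--     rest = []
--     for x in tournament:
--         if x == "R" and nR > 0:
--             nR -= 1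
--         elif x == "P" and nP > 0:
--             nP -= 1
--         elif x == "S" and nS > 0:
--             nS -= 1
--         else:
--             rest.append(x)
--     return prefix + "".join(rest)
-- ===== Notes on version B (the rewrite author's own statement) =====
-- stated objective: alternative
-- what changed: Replaces the repeated list.index/list.pop scans (a while loop popping 3 R's and a P each round, then two conditional pop rounds) with counting R/P/S once, emitting the whole prefix arithmetically, and one linear pass that collects the leftover fighters in original order.
import Mathlib
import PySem

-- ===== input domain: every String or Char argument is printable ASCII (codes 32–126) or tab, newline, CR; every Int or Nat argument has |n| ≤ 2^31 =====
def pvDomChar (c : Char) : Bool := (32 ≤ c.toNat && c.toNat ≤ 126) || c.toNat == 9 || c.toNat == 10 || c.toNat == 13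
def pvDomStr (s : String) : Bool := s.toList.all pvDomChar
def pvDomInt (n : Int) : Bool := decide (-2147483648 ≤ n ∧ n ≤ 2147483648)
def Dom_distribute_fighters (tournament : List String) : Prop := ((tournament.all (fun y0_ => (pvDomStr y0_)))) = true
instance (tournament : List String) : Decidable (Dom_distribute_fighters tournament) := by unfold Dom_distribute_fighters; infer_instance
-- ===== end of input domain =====

-- B replaces A's repeated list.index/list.pop scans by counting R/P/S once, emitting the
-- prefix arithmetically, and collecting leftovers in one pass (A mutates its argument in
-- place, B does not; the equivalence proved is about the return value only).

-- ===== PORT A =====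
-- tournament.pop(tournament.index(x)) : none exactly where Python's list.index raises ValueError
def pvPopType (t : List String) (x : String) : Option (String × List String) :=
  (PySem.List.index? t x).bind (fun i => PySem.List.pop? t (i : Int))

def getMagicSequence3R1P (t : List String) : Option (String × List String) :=
  match pvPopType t "R" with
  | none => none
  | some (v1, t1) =>
  match pvPopType t1 "R" with
  | none => none
  | some (v2, t2) =>
  match pvPopType t2 "R" with
  | none => none
  | some (v3, t3) =>
  match pvPopType t3 "P" with
  | none => none
  | some (v4, t4) => some ("" ++ v1 ++ v2 ++ v3 ++ v4, t4)

def getMagicSequenceRP (t : List String) : Option (String × List String) :=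
  match pvPopType t "R" with
  | none => none
  | some (v1, t1) =>
  match pvPopType t1 "P" with
  | none => none
  | some (v2, t2) => some ("" ++ v1 ++ v2, t2)

-- try/except: the P branch failing (index raising) falls back to popping an S
def getMagicSequenceRX (t : List String) : Option (String × List String) :=
  match pvPopType t "R" with
  | none => none
  | some (v1, t1) =>
  match pvPopType t1 "P" with
  | some (v2, t2) => some ("" ++ v1 ++ v2, t2)
  | none =>
    match pvPopType t1 "S" with
    | some (v2, t2) => some ("" ++ v1 ++ v2, t2)
    | none => none

-- the while loop; fuel only for termination (each round removes 4 elements, so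
-- tournament.length + 1 rounds are never exhausted while the condition holds)
def pvLoopA : Nat → List String → String → Option (String × List String)
  | 0, t, acc => some (acc, t)
  | (n+1), t, acc =>
    if 3 ≤ PySem.List.count t "R" ∧ 1 ≤ PySem.List.count t "P" then
      match getMagicSequence3R1P t with
      | none => none
      | some (s, t') => pvLoopA n t' (acc ++ s)
    else some (acc, t)

def distribute_fighters (tournament : List String) : String :=
  match pvLoopA (tournament.length + 1) tournament "" with
  | none => ""
  | some (dist, t1) =>
    let step2 : Option (String × List String) :=
      if 2 ≤ PySem.List.count t1 "R" then
        match getMagicSequenceRP t1 with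
        | none => none
        | some (s, t') => some (dist ++ s, t')
      else some (dist, t1)
    match step2 with
    | none => ""
    | some (d2, t2) =>
      if 1 ≤ PySem.List.count t2 "R" then
        match getMagicSequenceRX t2 with
        | none => ""
        | some (s, t3) => d2 ++ s ++ PySem.Str.join "" t3
      else d2 ++ PySem.Str.join "" t2

-- ===== PORT B =====
-- "RRRP" * k  (Python string repetition, by hand: PySem has no string-repeat primitive)
def pvStrRep (s : String) : Nat → String
  | 0 => ""
  | n+1 => s ++ pvStrRep s n

-- body of B's single collecting pass: state (rest, nR, nP, nS)
def pvPassStep (st : List String × Nat × Nat × Nat) (x : String) : List String × Nat × Nat × Nat :=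
  let (out, nR, nP, nS) := st
  if x == "R" ∧ 0 < nR then (out, nR - 1, nP, nS)
  else if x == "P" ∧ 0 < nP then (out, nR, nP - 1, nS)
  else if x == "S" ∧ 0 < nS then (out, nR, nP, nS - 1)
  else (out ++ [x], nR, nP, nS)

def distribute_fighters_alt (tournament : List String) : String :=
  let r := PySem.List.count tournament "R"
  let p := PySem.List.count tournament "P"
  let k := min (r / 3) p
  let pre0 := pvStrRep "RRRP" k
  let nR0 := 3 * k
  let nP0 := k
  let nS0 := 0
  let r1 := r - 3 * k
  let p1 := p - k
  -- Nat subtraction is exact here: 3*k ≤ r and k ≤ p; the one place Python's p1 can go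
  -- negative (p1 - 1 with p1 = 0 below) is only ever tested by `1 ≤ p1`, false either way.
  match (if 2 ≤ r1 then (pre0 ++ "RP", nR0 + 1, nP0 + 1, r1 - 1, p1 - 1)
         else (pre0, nR0, nP0, r1, p1) : String × Nat × Nat × Nat × Nat) with
  | (pre1, nR1, nP1, r2, p2) =>
  match (if 1 ≤ r2 then
           if 1 ≤ p2 then (pre1 ++ "RP", nR1 + 1, nP1 + 1, nS0)
           else (pre1 ++ "RS", nR1 + 1, nP1, nS0 + 1)
         else (pre1, nR1, nP1, nS0) : String × Nat × Nat × Nat) with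
  | (pre2, nR2, nP2, nS2) =>
    let pass := tournament.foldl pvPassStep ([], nR2, nP2, nS2)
    pre2 ++ PySem.Str.join "" pass.1

-- ===== PRECONDITION & SPEC =====
-- Pre_ excludes exactly the inputs where A raises ValueError: after the RRRP rounds,
-- ≥2 R's left with no P, or one R left with neither P nor S.
def Pre_distribute_fighters (tournament : List String) : Prop :=
  let r := PySem.List.count tournament "R"
  let p := PySem.List.count tournament "P"
  let s := PySem.List.count tournament "S"
  let k := min (r / 3) p
  let r1 := r - 3 * k
  let p1 := p - k
  (2 ≤ r1 → 1 ≤ p1 ∧ (2 ≤ p1 ∨ 1 ≤ s)) ∧ (r1 = 1 → 1 ≤ p1 ∨ 1 ≤ s)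
instance (tournament : List String) : Decidable (Pre_distribute_fighters tournament) := by
  unfold Pre_distribute_fighters; infer_instance

def pvWitness_distribute_fighters : List String := ["R", "P"]

def Spec_distribute_fighters (tournament : List String) (out : String) : Prop :=
  out = distribute_fighters_alt tournament
instance (tournament : List String) (out : String) : Decidable (Spec_distribute_fighters tournament out) := by
  unfold Spec_distribute_fighters; infer_instance

-- ===== CLAIM (what is proved, stated in full; the proofs are below) =====
def Claim_equal_distribute_fighters : Prop := ∀ (tournament : List String), Dom_distribute_fighters tournament → Pre_distribute_fighters tournament → Spec_distribute_fighters tournament (distribute_fighters tournament)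


-- ===== LEMMAS AND PROOFS =====

-- the four erasures one loop round performs, and k rounds of them
def pvErase4 (t : List String) : List String := (((t.erase "R").erase "R").erase "R").erase "P"

def pvRemK : Nat → List String → List String
  | 0, t => t
  | k+1, t => pvRemK k (pvErase4 t)

lemma pvMem {t : List String} {x : String} (h : 1 ≤ PySem.List.count t x) : x ∈ t := by
  rw [PySem.List.count_eq] at h
  exact List.count_pos_iff.mp h

lemma pvNotMem {t : List String} {x : String} (h : PySem.List.count t x = 0) : x ∉ t := by
  rw [PySem.List.count_eq] at h
  exact List.count_eq_zero.mp h

lemma pvCount_erase_self (t : List String) (x : String) :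
    PySem.List.count (t.erase x) x = PySem.List.count t x - 1 := by
  simp [PySem.List.count_eq, List.count_erase_self]

lemma pvCount_erase_ne {x y : String} (h : x ≠ y) (t : List String) :
    PySem.List.count (t.erase y) x = PySem.List.count t x := by
  simp [PySem.List.count_eq, List.count_erase_of_ne h]

lemma pvPop_of_mem : ∀ (t : List String) (x : String), x ∈ t → pvPopType t x = some (x, t.erase x) := by
  intro t
  induction t with
  | nil => intro x h; cases h
  | cons y ys ih =>
    intro x h
    unfold pvPopType
    by_cases hy : y = x
    · subst hy
      rw [PySem.List.index?_cons_self y ys]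
      simp [PySem.List.pop?_zero_cons]
    · have hx : x ∈ ys := by
        rcases List.mem_cons.mp h with h' | h'
        · exact absurd h'.symm hy
        · exact h'
      rw [PySem.List.index?_cons_of_ne ys hy]
      have hthis := ih x hx
      unfold pvPopType at hthis
      obtain ⟨i, hi⟩ := Option.isSome_iff_exists.mp ((PySem.List.index?_isSome_iff ys x).mpr hx)
      obtain ⟨hilt, hget, -⟩ := PySem.List.getElem_of_index?_eq_some hi
      rw [hi, Option.bind_some, PySem.List.pop?_natCast ys i hilt] at hthis
      have hB : ys.eraseIdx i = ys.erase x := by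
        injection hthis with h1; injection h1 with _ h2
      rw [hi]
      simp only [Option.map_some, Option.bind_some]
      have hlt2 : i + 1 < (y :: ys).length := Nat.succ_lt_succ hilt
      have hpop := PySem.List.pop?_natCast (y :: ys) (i+1) hlt2
      rw [hpop]
      simp [hget, hB, List.erase_cons_tail, hy]

lemma pvPop_of_not_mem {t : List String} {x : String} (h : x ∉ t) : pvPopType t x = none := by
  unfold pvPopType
  rw [(PySem.List.index?_eq_none_iff t x).mpr h]
  rfl

lemma pvSeq3_eq (t : List String) (h3 : 3 ≤ PySem.List.count t "R") (h1 : 1 ≤ PySem.List.count t "P") :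
    getMagicSequence3R1P t = some ("RRRP", pvErase4 t) := by
  have m1 : "R" ∈ t := pvMem (by omega)
  have c1 := pvCount_erase_self t "R"
  have m2 : "R" ∈ t.erase "R" := pvMem (by omega)
  have c2 := pvCount_erase_self (t.erase "R") "R"
  have m3 : "R" ∈ (t.erase "R").erase "R" := pvMem (by omega)
  have cp1 := pvCount_erase_ne (show ("P":String) ≠ "R" by decide) t
  have cp2 := pvCount_erase_ne (show ("P":String) ≠ "R" by decide) (t.erase "R")
  have cp3 := pvCount_erase_ne (show ("P":String) ≠ "R" by decide) ((t.erase "R").erase "R")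
  have m4 : "P" ∈ ((t.erase "R").erase "R").erase "R" := pvMem (by omega)
  simp only [getMagicSequence3R1P, pvPop_of_mem t "R" m1, pvPop_of_mem _ "R" m2,
    pvPop_of_mem _ "R" m3, pvPop_of_mem _ "P" m4]
  rfl

lemma pvSeqRP_eq (t : List String) (h2 : 1 ≤ PySem.List.count t "R") (h1 : 1 ≤ PySem.List.count t "P") :
    getMagicSequenceRP t = some ("RP", (t.erase "R").erase "P") := by
  have m1 : "R" ∈ t := pvMem (by omega)
  have cp1 := pvCount_erase_ne (show ("P":String) ≠ "R" by decide) t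
  have m2 : "P" ∈ t.erase "R" := pvMem (by omega)
  simp only [getMagicSequenceRP, pvPop_of_mem t "R" m1, pvPop_of_mem _ "P" m2]
  rfl

lemma pvSeqRX_P (t : List String) (h1 : 1 ≤ PySem.List.count t "R")
    (hp : 1 ≤ PySem.List.count (t.erase "R") "P") :
    getMagicSequenceRX t = some ("RP", (t.erase "R").erase "P") := by
  have m1 : "R" ∈ t := pvMem (by omega)
  have m2 : "P" ∈ t.erase "R" := pvMem hp
  simp only [getMagicSequenceRX, pvPop_of_mem t "R" m1, pvPop_of_mem _ "P" m2]
  rfl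

lemma pvSeqRX_S (t : List String) (h1 : 1 ≤ PySem.List.count t "R")
    (hp : PySem.List.count (t.erase "R") "P" = 0)
    (hs : 1 ≤ PySem.List.count (t.erase "R") "S") :
    getMagicSequenceRX t = some ("RS", (t.erase "R").erase "S") := by
  have m1 : "R" ∈ t := pvMem (by omega)
  have m2 : "S" ∈ t.erase "R" := pvMem hs
  simp only [getMagicSequenceRX, pvPop_of_mem t "R" m1, pvPop_of_not_mem (pvNotMem hp),
    pvPop_of_mem _ "S" m2]
  rfl

lemma pvCount_erase4_R (t : List String) (h : 3 ≤ PySem.List.count t "R") :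
    PySem.List.count (pvErase4 t) "R" = PySem.List.count t "R" - 3 := by
  unfold pvErase4
  rw [pvCount_erase_ne (show ("R":String) ≠ "P" by decide),
      pvCount_erase_self, pvCount_erase_self, pvCount_erase_self]
  omega

lemma pvCount_erase4_P (t : List String) :
    PySem.List.count (pvErase4 t) "P" = PySem.List.count t "P" - 1 := by
  unfold pvErase4
  rw [pvCount_erase_self,
      pvCount_erase_ne (show ("P":String) ≠ "R" by decide),
      pvCount_erase_ne (show ("P":String) ≠ "R" by decide),
      pvCount_erase_ne (show ("P":String) ≠ "R" by decide)]

lemma pvCount_erase4_S (t : List String) :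
    PySem.List.count (pvErase4 t) "S" = PySem.List.count t "S" := by
  unfold pvErase4
  rw [pvCount_erase_ne (show ("S":String) ≠ "P" by decide),
      pvCount_erase_ne (show ("S":String) ≠ "R" by decide),
      pvCount_erase_ne (show ("S":String) ≠ "R" by decide),
      pvCount_erase_ne (show ("S":String) ≠ "R" by decide)]

lemma pvCount_remK : ∀ (k : Nat) (t : List String), 3*k ≤ PySem.List.count t "R" →
    k ≤ PySem.List.count t "P" →
    PySem.List.count (pvRemK k t) "R" = PySem.List.count t "R" - 3*k ∧
    PySem.List.count (pvRemK k t) "P" = PySem.List.count t "P" - k ∧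
    PySem.List.count (pvRemK k t) "S" = PySem.List.count t "S" := by
  intro k
  induction k with
  | zero => intro t _ _; simp [pvRemK]
  | succ k ih =>
    intro t h3 h1
    have hR := pvCount_erase4_R t (by omega)
    have hP := pvCount_erase4_P t
    have hS := pvCount_erase4_S t
    have := ih (pvErase4 t) (by omega) (by omega)
    simp only [pvRemK]
    omega

lemma pvLoop_eq : ∀ (fuel : Nat) (t : List String) (acc : String),
    min (PySem.List.count t "R" / 3) (PySem.List.count t "P") ≤ fuel →
    pvLoopA fuel t acc =
      some (acc ++ pvStrRep "RRRP" (min (PySem.List.count t "R" / 3) (PySem.List.count t "P")),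
            pvRemK (min (PySem.List.count t "R" / 3) (PySem.List.count t "P")) t) := by
  intro fuel
  induction fuel with
  | zero =>
    intro t acc h
    have hm : min (PySem.List.count t "R" / 3) (PySem.List.count t "P") = 0 := by omega
    rw [hm]
    simp [pvLoopA, pvRemK, pvStrRep, String.append_empty]
  | succ n ih =>
    intro t acc h
    by_cases hc : 3 ≤ PySem.List.count t "R" ∧ 1 ≤ PySem.List.count t "P"
    · have hR := pvCount_erase4_R t hc.1
      have hP := pvCount_erase4_P t
      have hm1 : 1 ≤ min (PySem.List.count t "R" / 3) (PySem.List.count t "P") := by omega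
      have hm : min (PySem.List.count (pvErase4 t) "R" / 3) (PySem.List.count (pvErase4 t) "P")
          = min (PySem.List.count t "R" / 3) (PySem.List.count t "P") - 1 := by omega
      simp only [pvLoopA, if_pos hc, pvSeq3_eq t hc.1 hc.2]
      rw [ih (pvErase4 t) (acc ++ "RRRP") (by omega), hm]
      obtain ⟨j, hj⟩ : ∃ j, min (PySem.List.count t "R" / 3) (PySem.List.count t "P") = j + 1 :=
        ⟨_, (Nat.succ_pred_eq_of_pos hm1).symm⟩
      rw [hj]
      simp only [Nat.add_sub_cancel, pvRemK, pvStrRep, String.append_assoc]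
    · have hm : min (PySem.List.count t "R" / 3) (PySem.List.count t "P") = 0 := by omega
      have hstop : pvLoopA (n+1) t acc = some (acc, t) := by
        simp only [pvLoopA]
        rw [if_neg hc]
      rw [hstop, hm]
      simp [pvRemK, pvStrRep, String.append_empty]

lemma pvPass_zero : ∀ (t : List String) (out : List String),
    t.foldl pvPassStep (out, 0, 0, 0) = (out ++ t, 0, 0, 0) := by
  intro t
  induction t with
  | nil => intro out; simp
  | cons y ys ih =>
    intro out
    simp only [List.foldl_cons, pvPassStep]
    simp only [Nat.lt_irrefl, and_false, if_false]
    rw [ih (out ++ [y])]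
    simp

lemma pvPass_eraseR : ∀ (t : List String) (out : List String) (nR nP nS : Nat), "R" ∈ t →
    t.foldl pvPassStep (out, nR + 1, nP, nS) = (t.erase "R").foldl pvPassStep (out, nR, nP, nS) := by
  intro t
  induction t with
  | nil => intro _ _ _ _ h; cases h
  | cons y ys ih =>
    intro out nR nP nS h
    by_cases hy : y = "R"
    · subst hy
      rw [List.erase_cons_head]
      simp [List.foldl_cons, pvPassStep]
    · have hx : "R" ∈ ys := by
        rcases List.mem_cons.mp h with h' | h'
        · exact absurd h'.symm hy
        · exact h'
      rw [List.erase_cons_tail (by simp [hy])]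
      simp only [List.foldl_cons, pvPassStep, beq_iff_eq, hy, false_and, if_false]
      split_ifs with h1 h2
      · exact ih out nR (nP - 1) nS hx
      · exact ih out nR nP (nS - 1) hx
      · exact ih (out ++ [y]) nR nP nS hx

lemma pvPass_eraseP : ∀ (t : List String) (out : List String) (nR nP nS : Nat), "P" ∈ t →
    t.foldl pvPassStep (out, nR, nP + 1, nS) = (t.erase "P").foldl pvPassStep (out, nR, nP, nS) := by
  intro t
  induction t with
  | nil => intro _ _ _ _ h; cases h
  | cons y ys ih =>
    intro out nR nP nS h
    by_cases hy : y = "P"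
    · subst hy
      rw [List.erase_cons_head]
      simp [List.foldl_cons, pvPassStep]
    · have hx : "P" ∈ ys := by
        rcases List.mem_cons.mp h with h' | h'
        · exact absurd h'.symm hy
        · exact h'
      rw [List.erase_cons_tail (by simp [hy])]
      simp only [List.foldl_cons, pvPassStep, beq_iff_eq, hy, false_and, if_false]
      split_ifs with h1 h2
      · exact ih out (nR - 1) nP nS hx
      · exact ih out nR nP (nS - 1) hx
      · exact ih (out ++ [y]) nR nP nS hx

lemma pvPass_eraseS : ∀ (t : List String) (out : List String) (nR nP nS : Nat), "S" ∈ t →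
    t.foldl pvPassStep (out, nR, nP, nS + 1) = (t.erase "S").foldl pvPassStep (out, nR, nP, nS) := by
  intro t
  induction t with
  | nil => intro _ _ _ _ h; cases h
  | cons y ys ih =>
    intro out nR nP nS h
    by_cases hy : y = "S"
    · subst hy
      rw [List.erase_cons_head]
      simp [List.foldl_cons, pvPassStep]
    · have hx : "S" ∈ ys := by
        rcases List.mem_cons.mp h with h' | h'
        · exact absurd h'.symm hy
        · exact h'
      rw [List.erase_cons_tail (by simp [hy])]
      simp only [List.foldl_cons, pvPassStep, beq_iff_eq, hy, false_and, if_false]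
      split_ifs with h1 h2
      · exact ih out (nR - 1) nP nS hx
      · exact ih out nR (nP - 1) nS hx
      · exact ih (out ++ [y]) nR nP nS hx

lemma pvPass_remK : ∀ (k : Nat) (t : List String) (out : List String) (nR nP nS : Nat),
    3*k ≤ PySem.List.count t "R" → k ≤ PySem.List.count t "P" →
    t.foldl pvPassStep (out, 3*k + nR, k + nP, nS) =
      (pvRemK k t).foldl pvPassStep (out, nR, nP, nS) := by
  intro k
  induction k with
  | zero => intro t out nR nP nS _ _; simp [pvRemK]
  | succ k ih =>
    intro t out nR nP nS h3 h1
    have c1 := pvCount_erase_self t "R"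
    have c2 := pvCount_erase_self (t.erase "R") "R"
    have c3 := pvCount_erase_self ((t.erase "R").erase "R") "R"
    have cp1 := pvCount_erase_ne (show ("P":String) ≠ "R" by decide) t
    have cp2 := pvCount_erase_ne (show ("P":String) ≠ "R" by decide) (t.erase "R")
    have cp3 := pvCount_erase_ne (show ("P":String) ≠ "R" by decide) ((t.erase "R").erase "R")
    have m1 : "R" ∈ t := pvMem (by omega)
    have m2 : "R" ∈ t.erase "R" := pvMem (by omega)
    have m3 : "R" ∈ (t.erase "R").erase "R" := pvMem (by omega)
    have m4 : "P" ∈ ((t.erase "R").erase "R").erase "R" := pvMem (by omega)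
    have e1 : 3*(k+1) + nR = (3*k + nR + 2) + 1 := by omega
    have e2 : (k+1) + nP = (k + nP) + 1 := by omega
    rw [e1, e2]
    rw [pvPass_eraseR t out (3*k + nR + 2) ((k + nP) + 1) nS m1]
    have e3 : 3*k + nR + 2 = (3*k + nR + 1) + 1 := by omega
    rw [e3, pvPass_eraseR _ out (3*k + nR + 1) ((k + nP) + 1) nS m2]
    have e4 : 3*k + nR + 1 = (3*k + nR) + 1 := by omega
    rw [e4, pvPass_eraseR _ out (3*k + nR) ((k + nP) + 1) nS m3]
    rw [pvPass_eraseP _ out (3*k + nR) (k + nP) nS m4]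
    have hR4 := pvCount_erase4_R t (by omega)
    have hP4 := pvCount_erase4_P t
    simp only [pvRemK]
    exact ih (pvErase4 t) out nR nP nS (by omega) (by omega)

-- ===== VERDICT (by name: the statement is the Claim_ definition above) =====
theorem distribute_fighters_spec : Claim_equal_distribute_fighters := by
  intro t _ hpre
  unfold Spec_distribute_fighters distribute_fighters distribute_fighters_alt
  unfold Pre_distribute_fighters at hpre
  simp only at hpre
  have hlen : PySem.List.count t "P" ≤ t.length := by
    rw [PySem.List.count_eq]; exact List.count_le_length
  have hloop := pvLoop_eq (t.length + 1) t "" (by omega)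
  rw [hloop, String.empty_append]
  dsimp only
  generalize hK : min (PySem.List.count t "R" / 3) (PySem.List.count t "P") = k at hpre ⊢
  have hk3 : 3 * k ≤ PySem.List.count t "R" := by omega
  have hkp : k ≤ PySem.List.count t "P" := by omega
  obtain ⟨cR1, cP1, cS1⟩ := pvCount_remK k t hk3 hkp
  rw [cR1]
  by_cases h2 : 2 ≤ PySem.List.count t "R" - 3 * k
  · -- at least two R's remain after the RRRP rounds: A runs RP then RX
    obtain ⟨hp1, hps⟩ := hpre.1 h2
    have e1R := pvCount_erase_self (pvRemK k t) "R"
    have e1P := pvCount_erase_ne (show ("P":String) ≠ "R" by decide) (pvRemK k t)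
    have e1S := pvCount_erase_ne (show ("S":String) ≠ "R" by decide) (pvRemK k t)
    have e2R := pvCount_erase_ne (show ("R":String) ≠ "P" by decide) ((pvRemK k t).erase "R")
    have e2P := pvCount_erase_self ((pvRemK k t).erase "R") "P"
    have e2S := pvCount_erase_ne (show ("S":String) ≠ "P" by decide) ((pvRemK k t).erase "R")
    have e3R := pvCount_erase_self (((pvRemK k t).erase "R").erase "P") "R"
    have e3P := pvCount_erase_ne (show ("P":String) ≠ "R" by decide) (((pvRemK k t).erase "R").erase "P")
    have e3S := pvCount_erase_ne (show ("S":String) ≠ "R" by decide) (((pvRemK k t).erase "R").erase "P")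
    rw [if_pos h2, pvSeqRP_eq (pvRemK k t) (by omega) (by omega)]
    dsimp only
    rw [if_pos h2]
    dsimp only
    have hA3 : 1 ≤ PySem.List.count (((pvRemK k t).erase "R").erase "P") "R" := by omega
    rw [if_pos hA3]
    rw [if_pos (show 1 ≤ PySem.List.count t "R" - 3 * k - 1 by omega)]
    by_cases hq : 2 ≤ PySem.List.count t "P" - k
    · -- a P is still available for the RX round
      rw [pvSeqRX_P (((pvRemK k t).erase "R").erase "P") (by omega) (by omega)]
      dsimp only
      rw [if_pos (show 1 ≤ PySem.List.count t "P" - k - 1 by omega)]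
      dsimp only
      have hpass : t.foldl pvPassStep ([], 3*k+1+1, k+1+1, 0) =
          ([] ++ ((((((pvRemK k t).erase "R").erase "P").erase "R").erase "P")), 0, 0, 0) := by
        calc t.foldl pvPassStep ([], 3*k+1+1, k+1+1, 0)
            = (pvRemK k t).foldl pvPassStep ([], 2, 2, 0) :=
              pvPass_remK k t [] 2 2 0 (by omega) (by omega)
          _ = ((pvRemK k t).erase "R").foldl pvPassStep ([], 1, 2, 0) :=
              pvPass_eraseR (pvRemK k t) [] 1 2 0 (pvMem (by omega))
          _ = (((pvRemK k t).erase "R").erase "P").foldl pvPassStep ([], 1, 1, 0) :=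
              pvPass_eraseP ((pvRemK k t).erase "R") [] 1 1 0 (pvMem (by omega))
          _ = ((((pvRemK k t).erase "R").erase "P").erase "R").foldl pvPassStep ([], 0, 1, 0) :=
              pvPass_eraseR (((pvRemK k t).erase "R").erase "P") [] 0 1 0 (pvMem (by omega))
          _ = (((((pvRemK k t).erase "R").erase "P").erase "R").erase "P").foldl pvPassStep ([], 0, 0, 0) :=
              pvPass_eraseP ((((pvRemK k t).erase "R").erase "P").erase "R") [] 0 0 0 (pvMem (by omega))
          _ = _ := pvPass_zero _ []
      rw [hpass]
      simp only [List.nil_append, String.append_assoc]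
    · -- no P left: the RX round falls back to an S
      have hq1 : PySem.List.count t "P" - k = 1 := by omega
      have hs1 : 1 ≤ PySem.List.count t "S" := by omega
      rw [pvSeqRX_S (((pvRemK k t).erase "R").erase "P") (by omega) (by omega) (by omega)]
      dsimp only
      rw [if_neg (show ¬ 1 ≤ PySem.List.count t "P" - k - 1 by omega)]
      dsimp only
      have hpass : t.foldl pvPassStep ([], 3*k+1+1, k+1, 0+1) =
          ([] ++ ((((((pvRemK k t).erase "R").erase "P").erase "R").erase "S")), 0, 0, 0) := by
        calc t.foldl pvPassStep ([], 3*k+1+1, k+1, 0+1)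
            = (pvRemK k t).foldl pvPassStep ([], 2, 1, 1) :=
              pvPass_remK k t [] 2 1 1 (by omega) (by omega)
          _ = ((pvRemK k t).erase "R").foldl pvPassStep ([], 1, 1, 1) :=
              pvPass_eraseR (pvRemK k t) [] 1 1 1 (pvMem (by omega))
          _ = (((pvRemK k t).erase "R").erase "P").foldl pvPassStep ([], 1, 0, 1) :=
              pvPass_eraseP ((pvRemK k t).erase "R") [] 1 0 1 (pvMem (by omega))
          _ = ((((pvRemK k t).erase "R").erase "P").erase "R").foldl pvPassStep ([], 0, 0, 1) :=
              pvPass_eraseR (((pvRemK k t).erase "R").erase "P") [] 0 0 1 (pvMem (by omega))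
          _ = (((((pvRemK k t).erase "R").erase "P").erase "R").erase "S").foldl pvPassStep ([], 0, 0, 0) :=
              pvPass_eraseS ((((pvRemK k t).erase "R").erase "P").erase "R") [] 0 0 0 (pvMem (by omega))
          _ = _ := pvPass_zero _ []
      rw [hpass]
      simp only [List.nil_append, String.append_assoc]
  · -- fewer than two R's remain after the RRRP rounds
    have e1R := pvCount_erase_self (pvRemK k t) "R"
    have e1P := pvCount_erase_ne (show ("P":String) ≠ "R" by decide) (pvRemK k t)
    have e1S := pvCount_erase_ne (show ("S":String) ≠ "R" by decide) (pvRemK k t)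
    rw [if_neg h2]
    dsimp only
    rw [if_neg h2]
    dsimp only
    by_cases h1 : 1 ≤ PySem.List.count t "R" - 3 * k
    · -- exactly one R left: only the RX round runs
      rw [if_pos h1]
      rw [if_pos (show 1 ≤ PySem.List.count (pvRemK k t) "R" by omega)]
      by_cases hq : 1 ≤ PySem.List.count t "P" - k
      · rw [pvSeqRX_P (pvRemK k t) (by omega) (by omega)]
        dsimp only
        rw [if_pos hq]
        dsimp only
        have hpass : t.foldl pvPassStep ([], 3*k+1, k+1, 0) =
            ([] ++ (((pvRemK k t).erase "R").erase "P"), 0, 0, 0) := by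
          calc t.foldl pvPassStep ([], 3*k+1, k+1, 0)
              = (pvRemK k t).foldl pvPassStep ([], 1, 1, 0) :=
                pvPass_remK k t [] 1 1 0 (by omega) (by omega)
            _ = ((pvRemK k t).erase "R").foldl pvPassStep ([], 0, 1, 0) :=
                pvPass_eraseR (pvRemK k t) [] 0 1 0 (pvMem (by omega))
            _ = (((pvRemK k t).erase "R").erase "P").foldl pvPassStep ([], 0, 0, 0) :=
                pvPass_eraseP ((pvRemK k t).erase "R") [] 0 0 0 (pvMem (by omega))
            _ = _ := pvPass_zero _ []
        rw [hpass]
        simp only [List.nil_append, String.append_assoc]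
      · have hs1 : 1 ≤ PySem.List.count t "S" := by
          rcases hpre.2 (by omega) with h | h
          · exact absurd h hq
          · exact h
        rw [pvSeqRX_S (pvRemK k t) (by omega) (by omega) (by omega)]
        dsimp only
        rw [if_neg hq]
        dsimp only
        have hpass : t.foldl pvPassStep ([], 3*k+1, k, 0+1) =
            ([] ++ (((pvRemK k t).erase "R").erase "S"), 0, 0, 0) := by
          calc t.foldl pvPassStep ([], 3*k+1, k, 0+1)
              = (pvRemK k t).foldl pvPassStep ([], 1, 0, 1) :=
                pvPass_remK k t [] 1 0 1 (by omega) (by omega)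
            _ = ((pvRemK k t).erase "R").foldl pvPassStep ([], 0, 0, 1) :=
                pvPass_eraseR (pvRemK k t) [] 0 0 1 (pvMem (by omega))
            _ = (((pvRemK k t).erase "R").erase "S").foldl pvPassStep ([], 0, 0, 0) :=
                pvPass_eraseS ((pvRemK k t).erase "R") [] 0 0 0 (pvMem (by omega))
            _ = _ := pvPass_zero _ []
        rw [hpass]
        simp only [List.nil_append, String.append_assoc]
    · -- no R left: nothing more is emitted
      rw [if_neg h1]
      rw [if_neg (show ¬ 1 ≤ PySem.List.count (pvRemK k t) "R" by omega)]
      dsimp only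
      have hpass : t.foldl pvPassStep ([], 3*k, k, 0) =
          ([] ++ pvRemK k t, 0, 0, 0) := by
        calc t.foldl pvPassStep ([], 3*k, k, 0)
            = (pvRemK k t).foldl pvPassStep ([], 0, 0, 0) :=
              pvPass_remK k t [] 0 0 0 (by omega) (by omega)
          _ = _ := pvPass_zero _ []
      rw [hpass]
      simp only [List.nil_append]
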